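-- pv_equiv track=rewrite | github.com/dmitri-scott-210/mcnp-skills | utils/lattice_indexing.py | parse_fill_array
-- ===== SOURCE A (Python) =====
-- from typing import Tuple, List, Dict, Optional
--
-- def parse_fill_array(fill_string: str, dims: Tuple[int, int, int]) -> Dict[Tuple[int, int, int], int]:
--     """
--     Parse FILL array specification
--
--     Args:
--         fill_string: FILL array data (space-separated universe numbers)
--         dims: Lattice dimensions (nx, ny, nz)
--
--     Returns:
--         Dictionary mapping (i, j, k) to universe number
--     """
--     universes = [int(u) for u in fill_string.split()]
--     fill_map = {}
--
--     nx, ny, nz = dims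
--     idx = 0
--
--     # MCNP FILL order: z varies fastest, then y, then x
--     for i in range(nx):
--         for j in range(ny):
--             for k in range(nz):
--                 if idx < len(universes):
--                     fill_map[(i, j, k)] = universes[idx]
--                     idx += 1
--
--     return fill_map
-- ===== SOURCE B (Python) =====
-- def parse_fill_array(fill_string, dims):
--     """Single flat pass: decode each flat index arithmetically instead of a triple nested loop."""
--     universes = [int(u) for u in fill_string.split()]
--     nx, ny, nz = dims
--     fill_map = {}
--     if nx > 0 and ny > 0 and nz > 0:
--         total = nx * ny * nz
--         stride = ny * nz
--         for idx, val in enumerate(universes):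
--             if idx >= total:
--                 break
--             i, rem = divmod(idx, stride)
--             j, k = divmod(rem, nz)
--             fill_map[(i, j, k)] = val
--     return fill_map
-- ===== Notes on version B (the rewrite author's own statement) =====
-- stated objective: alternative
-- what changed: Replaced the triple nested loop with a running index guard by a single flat pass over enumerate(universes) that decodes each flat index into (i,j,k) arithmetically with divmod, breaking once the lattice is full.
import Mathlib
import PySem

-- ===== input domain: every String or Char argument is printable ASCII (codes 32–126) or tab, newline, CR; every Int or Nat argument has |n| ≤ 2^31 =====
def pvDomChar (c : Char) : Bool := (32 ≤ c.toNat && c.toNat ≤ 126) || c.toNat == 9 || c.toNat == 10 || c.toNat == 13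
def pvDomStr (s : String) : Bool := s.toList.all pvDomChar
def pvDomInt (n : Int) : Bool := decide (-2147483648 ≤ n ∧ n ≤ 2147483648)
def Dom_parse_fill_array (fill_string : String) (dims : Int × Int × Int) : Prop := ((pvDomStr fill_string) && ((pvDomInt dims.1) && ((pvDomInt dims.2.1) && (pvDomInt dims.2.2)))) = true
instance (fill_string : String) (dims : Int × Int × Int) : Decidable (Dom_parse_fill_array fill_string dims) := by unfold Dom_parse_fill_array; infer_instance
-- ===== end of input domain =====

-- B replaces A's triple nested loop with a running-index guard by a single flat pass over
-- enumerate(universes) that decodes each flat index into (i,j,k) with divmod; same dict proved.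

-- ===== PORT A =====
def parse_fill_array (fill_string : String) (dims : Int × Int × Int) : List (Int × Int × Int × Int) :=
  let universes : List Int := (PySem.Str.split₀ fill_string).map (fun u => (PySem.Int.ofStr? u).getD 0)
  let nx := dims.1
  let ny := dims.2.1
  let nz := dims.2.2
  let st := (PySem.List.pyRange 0 nx 1).foldl (fun s i =>
      (PySem.List.pyRange 0 ny 1).foldl (fun s j =>
        (PySem.List.pyRange 0 nz 1).foldl (fun s k =>
          if s.2 < (universes.length : Int) then
            (s.1.insert (i, j, k) ((PySem.List.pyGet? universes s.2).getD 0), s.2 + 1)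
          else s) s) s)
    ((PySem.Dict.empty : PySem.Dict (Int × Int × Int) Int), (0 : Int))
  st.1.items.map (fun p => (p.1.1, p.1.2.1, p.1.2.2, p.2))

-- ===== PORT B =====
def pvAltLoop (total stride nz : Int) (pairs : List (Int × Int)) (fill_map : PySem.Dict (Int × Int × Int) Int) : PySem.Dict (Int × Int × Int) Int :=
  match pairs with
  | [] => fill_map
  | (idx, val) :: rest =>
    if idx ≥ total then fill_map
    else
      let i := PySem.Int.floordiv idx stride
      let rem := PySem.Int.mod idx stride
      let j := PySem.Int.floordiv rem nz
      let k := PySem.Int.mod rem nz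
      pvAltLoop total stride nz rest (fill_map.insert (i, j, k) val)

def parse_fill_array_alt (fill_string : String) (dims : Int × Int × Int) : List (Int × Int × Int × Int) :=
  let universes : List Int := (PySem.Str.split₀ fill_string).map (fun u => (PySem.Int.ofStr? u).getD 0)
  let nx := dims.1
  let ny := dims.2.1
  let nz := dims.2.2
  let fill_map : PySem.Dict (Int × Int × Int) Int :=
    if nx > 0 ∧ ny > 0 ∧ nz > 0 then
      pvAltLoop (nx * ny * nz) (ny * nz) nz (PySem.List.enumerate universes 0) PySem.Dict.empty
    else PySem.Dict.empty
  fill_map.items.map (fun p => (p.1.1, p.1.2.1, p.1.2.2, p.2))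

-- ===== PRECONDITION & SPEC =====
-- Pre_ excludes exactly the inputs where int() raises ValueError on some whitespace-separated token of fill_string.
def Pre_parse_fill_array (fill_string : String) (dims : Int × Int × Int) : Prop :=
  ∀ u ∈ PySem.Str.split₀ fill_string, (PySem.Int.ofStr? u).isSome = true
instance (fill_string : String) (dims : Int × Int × Int) : Decidable (Pre_parse_fill_array fill_string dims) := by unfold Pre_parse_fill_array; infer_instance
def pvWitness_parse_fill_array : String × (Int × Int × Int) := ("1 2 3 4", (2, 1, 2))

def Spec_parse_fill_array (fill_string : String) (dims : Int × Int × Int) (out : List (Int × Int × Int × Int)) : Prop := out = parse_fill_array_alt fill_string dims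
instance (fill_string : String) (dims : Int × Int × Int) (out : List (Int × Int × Int × Int)) : Decidable (Spec_parse_fill_array fill_string dims out) := by unfold Spec_parse_fill_array; infer_instance

-- ===== CLAIM (what is proved, stated in full; the proofs are below) =====
def Claim_equal_parse_fill_array : Prop := ∀ (fill_string : String) (dims : Int × Int × Int), Dom_parse_fill_array fill_string dims → Pre_parse_fill_array fill_string dims → Spec_parse_fill_array fill_string dims (parse_fill_array fill_string dims)

-- ===== LEMMAS AND PROOFS =====

-- the single insert both loops perform, uncurried
def pvIns (d : PySem.Dict (Int × Int × Int) Int) (p : (Int × Int × Int) × Int) : PySem.Dict (Int × Int × Int) Int :=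
  d.insert p.1 p.2

-- A's loop body as a function of the visited triple
def pvStep (u : List Int) (s : PySem.Dict (Int × Int × Int) Int × Int) (t : Int × Int × Int) : PySem.Dict (Int × Int × Int) Int × Int :=
  if s.2 < (u.length : Int) then (s.1.insert t ((PySem.List.pyGet? u s.2).getD 0), s.2 + 1) else s

-- decode of a flat index (z fastest)
def pvDec (b c n : Nat) : Int × Int × Int :=
  (((n / (b * c) : Nat) : Int), ((n % (b * c) / c : Nat) : Int), ((n % (b * c) % c : Nat) : Int))

theorem pv_foldl_flatMap {α β σ : Type} (g : σ → β → σ) (f : α → List β) :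
    ∀ (xs : List α) (s : σ), (xs.flatMap f).foldl g s = xs.foldl (fun s x => (f x).foldl g s) s := by
  intro xs
  induction xs with
  | nil => intro s; simp
  | cons x xs ih => intro s; simp [List.flatMap_cons, List.foldl_append, ih]

theorem pv_zip_lemma (u : List Int) :
    ∀ (L : List (Int × Int × Int)) (m : Nat) (d : PySem.Dict (Int × Int × Int) Int),
      L.foldl (pvStep u) (d, (m : Int)) =
        ((L.zip (u.drop m)).foldl pvIns d, ((m + min L.length (u.length - m) : Nat) : Int)) := by
  intro L
  induction L with
  | nil => intro m d; simp
  | cons t L ih =>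
    intro m d
    rw [List.foldl_cons]
    by_cases h : m < u.length
    · have hdrop : u.drop m = u[m] :: u.drop (m + 1) := List.drop_eq_getElem_cons h
      have hget : (PySem.List.pyGet? u (m : Int)).getD 0 = u[m] := by
        simp [List.getElem?_eq_getElem h]
      have hstep : pvStep u (d, (m : Int)) t = (d.insert t u[m], ((m + 1 : Nat) : Int)) := by
        simp only [pvStep]
        have hc1 : ((m : Nat) : Int) + 1 = (((m + 1 : Nat)) : Int) := by push_cast; ring
        rw [if_pos (by exact_mod_cast h), hget, hc1]
      rw [hstep, ih (m + 1) (d.insert t u[m]), hdrop, List.zip_cons_cons, List.foldl_cons]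
      have harith : (m + 1) + min L.length (u.length - (m + 1)) =
          m + min (t :: L).length (u.length - m) := by
        simp only [List.length_cons]; omega
      rw [harith]
      rfl
    · have hdrop : u.drop m = [] := List.drop_eq_nil_of_le (by omega)
      have hstep : pvStep u (d, (m : Int)) t = (d, (m : Int)) := by
        simp only [pvStep]
        rw [if_neg (by exact_mod_cast h)]
      rw [hstep, ih m d, hdrop]
      have harith : m + min L.length (u.length - m) = m + min (t :: L).length (u.length - m) := by
        simp only [List.length_cons]; omega
      rw [harith]
      simp [List.zip_nil_right]

theorem pv_block (a c : Nat) : ∀ (b : Nat),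
    (List.range b).flatMap (fun (j : Nat) => (List.range c).map (fun (k : Nat) => ((a : Int), (j : Int), (k : Int)))) =
      (List.range (b * c)).map (fun (t : Nat) => ((a : Int), ((t / c : Nat) : Int), ((t % c : Nat) : Int))) := by
  intro b
  induction b with
  | zero => simp
  | succ b ih =>
    rw [List.range_succ, List.flatMap_append, ih, Nat.succ_mul, List.range_add, List.map_append, List.map_map]
    congr 1
    simp only [List.flatMap_cons, List.flatMap_nil, List.append_nil]
    apply List.map_congr_left
    intro k hk
    simp only [List.mem_range] at hk
    have h1 : (b * c + k) / c = b := by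
      rw [Nat.add_comm, Nat.add_mul_div_right _ _ (by omega : 0 < c), Nat.div_eq_of_lt hk]
      omega
    have h2 : (b * c + k) % c = k := by
      rw [Nat.add_comm, Nat.add_mul_mod_self_right, Nat.mod_eq_of_lt hk]
    simp [Function.comp, h1, h2]

theorem pv_T_eq (b c : Nat) : ∀ (a : Nat),
    (List.range a).flatMap (fun (i : Nat) => (List.range b).flatMap (fun (j : Nat) =>
        (List.range c).map (fun (k : Nat) => ((i : Int), (j : Int), (k : Int))))) =
      (List.range (a * b * c)).map (pvDec b c) := by
  intro a
  induction a with
  | zero => simp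
  | succ a ih =>
    rw [List.range_succ, List.flatMap_append, ih]
    have hmul : (a + 1) * b * c = a * b * c + b * c := by ring
    rw [hmul, List.range_add, List.map_append, List.map_map]
    congr 1
    simp only [List.flatMap_cons, List.flatMap_nil, List.append_nil]
    rw [pv_block a c b]
    apply List.map_congr_left
    intro t ht
    simp only [List.mem_range] at ht
    have hbc : 0 < b * c := by omega
    have h1 : (a * b * c + t) / (b * c) = a := by
      rw [mul_assoc, Nat.add_comm, Nat.add_mul_div_right _ _ hbc, Nat.div_eq_of_lt ht]
      omega
    have h2 : (a * b * c + t) % (b * c) = t := by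
      rw [mul_assoc, Nat.add_comm, Nat.add_mul_mod_self_right, Nat.mod_eq_of_lt ht]
    simp [Function.comp, pvDec, h1, h2]

-- characterisation of A's triple loop
theorem pv_A_char (u : List Int) (a b c : Nat) :
    ((PySem.List.pyRange 0 (a : Int) 1).foldl (fun s i =>
        (PySem.List.pyRange 0 (b : Int) 1).foldl (fun s j =>
          (PySem.List.pyRange 0 (c : Int) 1).foldl (fun s k =>
            if s.2 < (u.length : Int) then
              (s.1.insert (i, j, k) ((PySem.List.pyGet? u s.2).getD 0), s.2 + 1)
            else s) s) s)
      ((PySem.Dict.empty : PySem.Dict (Int × Int × Int) Int), (0 : Int))).1 =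
      ((List.range (min (a * b * c) u.length)).map (fun n => (pvDec b c n, u.getD n 0))).foldl pvIns PySem.Dict.empty := by
  have hL : ((List.range a).flatMap (fun (i : Nat) => (List.range b).flatMap (fun (j : Nat) =>
        (List.range c).map (fun (k : Nat) => ((i : Int), (j : Int), (k : Int)))))).foldl (pvStep u)
        ((PySem.Dict.empty : PySem.Dict (Int × Int × Int) Int), ((0 : Nat) : Int)) =
      (PySem.List.pyRange 0 (a : Int) 1).foldl (fun s i =>
        (PySem.List.pyRange 0 (b : Int) 1).foldl (fun s j =>
          (PySem.List.pyRange 0 (c : Int) 1).foldl (fun s k =>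
            if s.2 < (u.length : Int) then
              (s.1.insert (i, j, k) ((PySem.List.pyGet? u s.2).getD 0), s.2 + 1)
            else s) s) s)
      ((PySem.Dict.empty : PySem.Dict (Int × Int × Int) Int), (0 : Int)) := by
    rw [PySem.List.pyRange_one, PySem.List.pyRange_one, PySem.List.pyRange_one]
    simp only [sub_zero, Int.toNat_natCast, zero_add, pv_foldl_flatMap, List.foldl_map,
      Nat.cast_zero, pvStep]
  rw [← hL, pv_T_eq b c a, pv_zip_lemma u]
  have hzip : ((List.range (a * b * c)).map (pvDec b c)).zip u =
      (List.range (min (a * b * c) u.length)).map (fun n => (pvDec b c n, u.getD n 0)) := by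
    apply List.ext_getElem
    · simp
    · intro n h1 h2
      simp only [List.getElem_zip, List.getElem_map, List.getElem_range]
      simp only [List.length_zip, List.length_map, List.length_range] at h1
      rw [List.getD_eq_getElem u 0 (by omega)]
  simp only [List.drop_zero, hzip]

-- characterisation of B's flat loop
theorem pv_alt (a b c : Nat) (u' : List Int) :
    ∀ (m : Nat) (d : PySem.Dict (Int × Int × Int) Int),
      pvAltLoop ((a * b * c : Nat) : Int) ((b * c : Nat) : Int) ((c : Nat) : Int)
          (PySem.List.enumerate u' (m : Int)) d =
        ((List.range (min u'.length (a * b * c - m))).map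
            (fun t => (pvDec b c (m + t), u'.getD t 0))).foldl pvIns d := by
  induction u' with
  | nil => intro m d; simp [PySem.List.enumerate_nil, pvAltLoop]
  | cons v u' ih =>
    intro m d
    rw [PySem.List.enumerate_cons]
    simp only [pvAltLoop]
    by_cases h : m < a * b * c
    · rw [if_neg (by exact_mod_cast (by omega : ¬ ((a * b * c : Nat) : Int) ≤ (m : Nat)))]
      have hc1 : ((m : Nat) : Int) + 1 = (((m + 1 : Nat)) : Int) := by push_cast; ring
      have hkey : ((PySem.Int.floordiv (m : Int) ((b * c : Nat) : Int),
          PySem.Int.floordiv (PySem.Int.mod (m : Int) ((b * c : Nat) : Int)) ((c : Nat) : Int),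
          PySem.Int.mod (PySem.Int.mod (m : Int) ((b * c : Nat) : Int)) ((c : Nat) : Int)) :
            Int × Int × Int) = pvDec b c m := by
        simp only [pvDec, PySem.Int.floordiv_natCast, PySem.Int.mod_natCast]
      rw [hc1, ih (m + 1) _]
      have h1 : min (v :: u').length (a * b * c - m) = (min u'.length (a * b * c - (m + 1))) + 1 := by
        simp only [List.length_cons]; omega
      rw [h1, List.range_succ_eq_map, List.map_cons, List.foldl_cons]
      have hmap : (List.range (min u'.length (a * b * c - (m + 1)))).map
            ((fun t => (pvDec b c (m + t), (v :: u').getD t 0)) ∘ Nat.succ) =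
          (List.range (min u'.length (a * b * c - (m + 1)))).map
            (fun t => (pvDec b c (m + 1 + t), u'.getD t 0)) := by
        apply List.map_congr_left
        intro t _
        have : m + (t + 1) = m + 1 + t := by omega
        simp [Function.comp, this]
      rw [List.map_map, hmap]
      simp only [pvIns, List.getD_cons_zero, Nat.add_zero, hkey]
    · rw [if_pos (by exact_mod_cast (by omega : ((a * b * c : Nat) : Int) ≤ (m : Nat)))]
      have h0 : a * b * c - m = 0 := by omega
      simp [h0]

theorem pv_B_char (u : List Int) (a b c : Nat) :
    pvAltLoop ((a : Int) * (b : Int) * (c : Int)) ((b : Int) * (c : Int)) ((c : Nat) : Int)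
        (PySem.List.enumerate u 0) PySem.Dict.empty =
      ((List.range (min u.length (a * b * c))).map (fun n => (pvDec b c n, u.getD n 0))).foldl pvIns PySem.Dict.empty := by
  have h := pv_alt a b c u 0 PySem.Dict.empty
  simp only [Nat.cast_zero, Nat.sub_zero, zero_add] at h
  have hc1 : (((a * b * c : Nat)) : Int) = (a : Int) * (b : Int) * (c : Int) := by push_cast; ring
  have hc2 : (((b * c : Nat)) : Int) = (b : Int) * (c : Int) := by push_cast; ring
  rw [hc1, hc2] at h
  exact h

-- ===== VERDICT (by name: the statement is the Claim_ definition above) =====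
theorem parse_fill_array_spec : Claim_equal_parse_fill_array := by
  intro fs dims _ _
  unfold Spec_parse_fill_array
  obtain ⟨nx, ny, nz⟩ := dims
  simp only [parse_fill_array, parse_fill_array_alt]
  by_cases hpos : nx > 0 ∧ ny > 0 ∧ nz > 0
  · obtain ⟨hx, hy, hz⟩ := hpos
    lift nx to ℕ using hx.le with a
    lift ny to ℕ using hy.le with b
    lift nz to ℕ using hz.le with c
    rw [if_pos ⟨hx, hy, hz⟩]
    rw [pv_A_char, pv_B_char, Nat.min_comm]
  · rw [if_neg hpos]
    have h : nx ≤ 0 ∨ ny ≤ 0 ∨ nz ≤ 0 := by omega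
    rcases h with h | h | h
    · rw [PySem.List.pyRange_one_eq_nil (by omega : nx ≤ 0)]
      simp
    · rw [PySem.List.pyRange_one_eq_nil (by omega : ny ≤ 0)]
      simp
    · rw [PySem.List.pyRange_one_eq_nil (by omega : nz ≤ 0)]
      simp
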